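-- pv_equiv track=rewrite | github.com/snehil-pandey/my-ai-learning-path | 01_regression/02_polynomial_regression/polynomial_regression_basics.py | build_matrix_A
-- ===== SOURCE A (Python) =====
-- def build_matrix_A(x_values, degree):
--     """
--     Construct the coefficient matrix A for polynomial regression.
--
--     A[i][j] = Σ x^(i+j)
--
--     Shape: (degree+1) × (degree+1)
--     """
--     n = degree + 1
--     A = [[0 for _ in range(n)] for _ in range(n)]
--
--     for i in range(n):
--         for j in range(n):
--             power = i + j
--             A[i][j] = sum(x ** power for x in x_values)
--
--     return A
-- ===== SOURCE B (Python) =====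
-- def build_matrix_A(x_values, degree):
--     # Precompute each power sum S[p] = sum(x**p) once, then index into it:
--     # O(degree*m + degree^2) instead of A's O(degree^2 * m).
--     n = degree + 1
--     S = [sum(x ** p for x in x_values) for p in range(2 * degree + 1)]
--     return [[S[i + j] for j in range(n)] for i in range(n)]
-- ===== Notes on version B (the rewrite author's own statement) =====
-- stated objective: faster
-- what changed: Precomputes the 2*degree+1 power sums once into a list S and fills the matrix by indexing S[i+j], instead of recomputing the full sum over x_values for every matrix cell; intended as faster (O(degree*m + degree^2) vs O(degree^2*m)); measured 60.46x at the largest size both finished, though at the biggest generated inputs both time out on huge big-int powers.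
import Mathlib
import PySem

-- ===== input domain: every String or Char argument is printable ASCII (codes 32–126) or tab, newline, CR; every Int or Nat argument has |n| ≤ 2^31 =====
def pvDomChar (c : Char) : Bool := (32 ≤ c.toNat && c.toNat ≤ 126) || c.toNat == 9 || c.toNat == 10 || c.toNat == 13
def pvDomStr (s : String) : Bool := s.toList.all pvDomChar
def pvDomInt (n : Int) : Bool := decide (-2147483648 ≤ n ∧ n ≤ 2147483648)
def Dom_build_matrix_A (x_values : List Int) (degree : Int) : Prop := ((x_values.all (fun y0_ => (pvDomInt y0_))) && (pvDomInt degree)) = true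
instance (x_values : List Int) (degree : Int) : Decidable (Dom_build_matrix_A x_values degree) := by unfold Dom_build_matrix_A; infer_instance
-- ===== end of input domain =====

-- B precomputes the power sums once and indexes them per cell instead of summing per cell; intended as faster (measured 60x at the largest size where both Pythons finished); same exact output.


-- ===== PORT A =====
-- Literal port of A: for each (i, j) in range(n) x range(n), recompute sum(x ** (i+j)).
-- (The zero-initialised matrix of A is fully overwritten by the loop, entry by entry, in order.)
def build_matrix_A (x_values : List Int) (degree : Int) : List (List Int) :=
  let n := degree + 1
  (PySem.List.pyRange 0 n 1).map (fun i =>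
    (PySem.List.pyRange 0 n 1).map (fun j =>
      (x_values.map (fun x => x ^ (i + j).toNat)).sum))

-- ===== PORT B =====
-- Port of B: precompute power sums S[p] for p in 0..2*degree, then index S[i+j].
def build_matrix_A_alt (x_values : List Int) (degree : Int) : List (List Int) :=
  let n := degree + 1
  let S := (PySem.List.pyRange 0 (2 * degree + 1) 1).map (fun p =>
    (x_values.map (fun x => x ^ p.toNat)).sum)
  (PySem.List.pyRange 0 n 1).map (fun i =>
    (PySem.List.pyRange 0 n 1).map (fun j => PySem.List.pyGetD S (i + j) 0))

-- ===== PRECONDITION & SPEC =====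
def Spec_build_matrix_A (x_values : List Int) (degree : Int) (out : List (List Int)) : Prop := out = build_matrix_A_alt x_values degree
instance (x_values : List Int) (degree : Int) (out : List (List Int)) : Decidable (Spec_build_matrix_A x_values degree out) := by unfold Spec_build_matrix_A; infer_instance

-- ===== CLAIM (what is proved, stated in full; the proofs are below) =====
def Claim_equal_build_matrix_A : Prop := ∀ (x_values : List Int) (degree : Int), Dom_build_matrix_A x_values degree → Spec_build_matrix_A x_values degree (build_matrix_A x_values degree)

-- ===== LEMMAS AND PROOFS =====

-- ===== VERDICT (by name: the statement is the Claim_ definition above) =====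
theorem build_matrix_A_spec : Claim_equal_build_matrix_A := by
  intro xs d _
  unfold Spec_build_matrix_A build_matrix_A build_matrix_A_alt
  refine (List.map_congr_left ?_).symm
  intro i hi
  rw [PySem.List.mem_pyRange_one] at hi
  refine List.map_congr_left ?_
  intro j hj
  rw [PySem.List.mem_pyRange_one] at hj
  exact PySem.List.pyGetD_map_pyRange_of_nonneg _ _ _ _ (by omega) (by omega)
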